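-- pv_equiv track=rewrite | github.com/george-poole/LUCiFEx | lucifex/utils/fenicsx_utils/elem_utils.py | is_equivalent_family
-- ===== SOURCE A (Python) =====
-- from enum import Enum
--
-- class ElementFamilyType(set, Enum):
--     CONTINUOUS_LAGRANGE = {"P", "Q", "CG", "Lagrange"}
--     DISCONTINOUS_LAGRANGE = {"DP", "DQ", "DG", "Discontinuous Lagrange"}
--     LAGRANGE = DISCONTINOUS_LAGRANGE | CONTINUOUS_LAGRANGE
--     BREZZI_DOUGLAS_MARINI = {"BDM", "Brezzi-Douglas-Marini"}
--     RAVIART_THOMAS = {"RT", "Raviart-Thomas"}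
--
-- def is_equivalent_family(
--     name: str,
--     other: str,
-- ) -> bool:
--     if name == other:
--         return True
--     else:
--         for family in ElementFamilyType:
--             if (name in family) and (other in family):
--                 return True
--         return False
-- ===== SOURCE B (Python) =====
-- # B: the family relation is an equivalence (LAGRANGE is the union of both Lagrange sets),
-- # so map every known name to a single canonical group label and compare labels.
-- _GROUP = {}
-- for _label, _names in (
--     ("lagrange", ("P", "Q", "CG", "Lagrange", "DP", "DQ", "DG", "Discontinuous Lagrange")),
--     ("bdm", ("BDM", "Brezzi-Douglas-Marini")),
--     ("rt", ("RT", "Raviart-Thomas")),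
-- ):
--     for _n in _names:
--         _GROUP[_n] = _label
--
--
-- def is_equivalent_family(
--     name: str,
--     other: str,
-- ) -> bool:
--     if name == other:
--         return True
--     g = _GROUP.get(name)
--     return g is not None and g == _GROUP.get(other)
-- ===== Notes on version B (the rewrite author's own statement) =====
-- stated objective: alternative
-- what changed: Exploits that A's relation is an equivalence (LAGRANGE is the union of the two Lagrange sets): B maps each name once to a canonical group label and compares two labels, instead of scanning all families for joint set membership.
import Mathlib
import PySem

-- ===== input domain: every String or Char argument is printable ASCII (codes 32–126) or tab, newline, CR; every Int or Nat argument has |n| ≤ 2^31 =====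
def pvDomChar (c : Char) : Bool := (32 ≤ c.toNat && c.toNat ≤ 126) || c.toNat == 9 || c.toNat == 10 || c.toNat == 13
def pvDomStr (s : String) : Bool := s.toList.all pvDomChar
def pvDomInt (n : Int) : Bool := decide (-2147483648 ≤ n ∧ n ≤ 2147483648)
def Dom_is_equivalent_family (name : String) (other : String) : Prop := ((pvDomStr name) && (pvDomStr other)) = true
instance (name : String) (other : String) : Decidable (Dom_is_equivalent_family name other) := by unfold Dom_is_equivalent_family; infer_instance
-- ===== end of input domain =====

-- B exploits that A's relation is an equivalence (LAGRANGE is the union of both Lagrange sets):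
-- each known name is mapped once to a canonical group label and the call compares two labels,
-- instead of A's per-call scan over all families for joint membership (objective: alternative).

-- ===== PORT A =====
-- The five enum members, in iteration order.  Each Python value is a set of strings used
-- only for membership tests, so PySem.Set String (a nodup list) is exact here.
def pvFamiliesA : List (PySem.Set String) :=
  [ ["P", "Q", "CG", "Lagrange"],
    ["DP", "DQ", "DG", "Discontinuous Lagrange"],
    ["DP", "DQ", "DG", "Discontinuous Lagrange", "P", "Q", "CG", "Lagrange"],
    ["BDM", "Brezzi-Douglas-Marini"],
    ["RT", "Raviart-Thomas"] ]

-- the for-loop with early `return True` is List.any over the families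
def is_equivalent_family (name : String) (other : String) : Bool :=
  if name == other then
    true
  else
    pvFamiliesA.any (fun family => PySem.Set.contains family name && PySem.Set.contains family other)

-- ===== PORT B =====
-- the (label, names) pairs of Source B's build loop
def pvGroupsB : List (String × List String) :=
  [ ("lagrange", ["P", "Q", "CG", "Lagrange", "DP", "DQ", "DG", "Discontinuous Lagrange"]),
    ("bdm", ["BDM", "Brezzi-Douglas-Marini"]),
    ("rt", ["RT", "Raviart-Thomas"]) ]

-- module-level build: for label, names in …: for n in names: _GROUP[n] = label
def pvGroupB : PySem.Dict String String :=
  pvGroupsB.foldl (fun d p => p.2.foldl (fun d n => d.insert n p.1) d) PySem.Dict.empty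

def is_equivalent_family_alt (name : String) (other : String) : Bool :=
  if name == other then
    true
  else
    match pvGroupB.get? name with
    | none => false                       -- g is None
    | some g => pvGroupB.get? other == some g   -- g == _GROUP.get(other)

-- ===== PRECONDITION & SPEC =====
def Spec_is_equivalent_family (name : String) (other : String) (out : Bool) : Prop := out = is_equivalent_family_alt name other
instance (name : String) (other : String) (out : Bool) : Decidable (Spec_is_equivalent_family name other out) := by unfold Spec_is_equivalent_family; infer_instance

-- ===== CLAIM (what is proved, stated in full; the proofs are below) =====
def Claim_equal_is_equivalent_family : Prop := ∀ (name : String) (other : String), Dom_is_equivalent_family name other → Spec_is_equivalent_family name other (is_equivalent_family name other)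

-- ===== LEMMAS AND PROOFS =====

-- the 12 family-name strings
def pvKeys : List String :=
  ["P", "Q", "CG", "Lagrange", "DP", "DQ", "DG", "Discontinuous Lagrange",
   "BDM", "Brezzi-Douglas-Marini", "RT", "Raviart-Thomas"]

-- the built label table, evaluated to a literal
lemma pvGroupB_eq : pvGroupB = PySem.Dict.mk
    [("P", "lagrange"), ("Q", "lagrange"), ("CG", "lagrange"), ("Lagrange", "lagrange"),
     ("DP", "lagrange"), ("DQ", "lagrange"), ("DG", "lagrange"),
     ("Discontinuous Lagrange", "lagrange"),
     ("BDM", "bdm"), ("Brezzi-Douglas-Marini", "bdm"), ("RT", "rt"), ("Raviart-Thomas", "rt")] := by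
  decide

-- a string outside the key set has no label
lemma get?_pvGroupB_of_not_mem (s : String) (hs : s ∉ pvKeys) :
    pvGroupB.get? s = none := by
  simp only [pvKeys, List.mem_cons, List.not_mem_nil, or_false, not_or] at hs
  obtain ⟨h1, h2, h3, h4, h5, h6, h7, h8, h9, h10, h11, h12⟩ := hs
  rw [pvGroupB_eq]
  simp [PySem.Dict.get?, Ne.symm h1, Ne.symm h2, Ne.symm h3, Ne.symm h4, Ne.symm h5,
    Ne.symm h6, Ne.symm h7, Ne.symm h8, Ne.symm h9, Ne.symm h10, Ne.symm h11, Ne.symm h12]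

-- a string outside the key set is in no family
lemma contains_family_of_not_mem (s : String) (hs : s ∉ pvKeys) (f : PySem.Set String)
    (hf : f ∈ pvFamiliesA) : PySem.Set.contains f s = false := by
  simp only [pvKeys, List.mem_cons, List.not_mem_nil, or_false, not_or] at hs
  obtain ⟨h1, h2, h3, h4, h5, h6, h7, h8, h9, h10, h11, h12⟩ := hs
  simp only [pvFamiliesA, List.mem_cons, List.not_mem_nil, or_false] at hf
  rcases hf with rfl | rfl | rfl | rfl | rfl <;>
    simp [PySem.Set.contains, h1, h2, h3, h4, h5, h6, h7, h8, h9, h10, h11, h12]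

-- if either argument is outside the key set, both programs reduce to `name == other`
lemma both_trivial_left (name other : String) (hn : name ∉ pvKeys) :
    is_equivalent_family name other = is_equivalent_family_alt name other := by
  unfold is_equivalent_family is_equivalent_family_alt
  split
  · rfl
  · rw [get?_pvGroupB_of_not_mem name hn]
    rw [List.any_eq_false.mpr (fun f hf => by
      rw [contains_family_of_not_mem name hn f hf]; simp)]

lemma both_trivial_right (name other : String) (ho : other ∉ pvKeys) :
    is_equivalent_family name other = is_equivalent_family_alt name other := by
  unfold is_equivalent_family is_equivalent_family_alt
  split
  · rfl
  · rw [get?_pvGroupB_of_not_mem other ho]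
    rw [List.any_eq_false.mpr (fun f hf => by
      rw [contains_family_of_not_mem other ho f hf]; simp)]
    cases pvGroupB.get? name <;> simp

-- ===== VERDICT (by name: the statement is the Claim_ definition above) =====
theorem is_equivalent_family_spec : Claim_equal_is_equivalent_family := by
  intro name other _
  unfold Spec_is_equivalent_family
  by_cases hn : name ∈ pvKeys
  · by_cases ho : other ∈ pvKeys
    · simp only [pvKeys, List.mem_cons, List.not_mem_nil, or_false] at hn ho
      rcases hn with rfl | rfl | rfl | rfl | rfl | rfl | rfl | rfl | rfl | rfl | rfl | rfl <;>
        rcases ho with rfl | rfl | rfl | rfl | rfl | rfl | rfl | rfl | rfl | rfl | rfl | rfl <;>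
          decide
    · exact both_trivial_right name other ho
  · exact both_trivial_left name other hn
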